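-- pv_equiv track=rewrite | github.com/liuwei464976266/mygit | play/QM9000.py | filterAdpoints
-- ===== SOURCE A (Python) =====
-- import copy
--
-- WILD = [10]
--
-- WILD_STR = ['10']
--
-- SCATTER = '9'
--
-- def filterAdpoints(adpoints, points):
--     filtedAdpoints = {}
--     myadpoints = copy.deepcopy(adpoints)  # 拷贝一个 myadpoints 避免后续直接修改adpoints对象
--     myDicAdpoints = {}
--     for key, value in myadpoints.items():
--         if key != SCATTER and key != '11':
--             col1, col2, col3, col4, col5 = [], [], [], [], []
--             for i in value:
--                 if i % 5 == 0:
--                     col1.append(i)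
--                 elif i % 5 == 1:
--                     col2.append(i)
--                 elif i % 5 == 2:
--                     col3.append(i)
--                 elif i % 5 == 3:
--                     col4.append(i)
--                 elif i % 5 == 4:
--                     col5.append(i)
--             if len(col5) > 0:
--                 mylinepoints = [[a, b, c, d, e] for a in col1 for b in col2 for c in col3 for d in col4 for e in col5]
--             elif len(col4) > 0:
--                 mylinepoints = [[a, b, c, d] for a in col1 for b in col2 for c in col3 for d in col4]
--             elif len(col3) > 0:
--                 mylinepoints = [[a, b, c] for a in col1 for b in col2 for c in col3]
--             elif len(col2) > 0:
--                 mylinepoints = [[a, b] for a in col1 for b in col2]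
--             else:
--                 mylinepoints = []
--             removeLines = []
--             for i in mylinepoints:
--                 if len([x for x in i if points[x] not in WILD]) <= 0 and key not in WILD_STR:
--                     removeLines.append(i)
--             for i in removeLines:
--                 mylinepoints.remove(i)
--             myListAdpoints = []
--             for i in mylinepoints:
--                 myListAdpoints += i
--             myListAdpoints = list(set(myListAdpoints))
--             myDicAdpoints[key] = myListAdpoints
--         elif key == SCATTER:
--             myDicAdpoints[SCATTER] = value
--         elif key == '11':
--             myDicAdpoints['11'] = value
--     return myDicAdpoints
-- ===== SOURCE B (Python) =====
-- WILD = [10]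
--
-- WILD_STR = ['10']
--
-- SCATTER = '9'
--
-- def filterAdpoints(adpoints, points):
--     out = {}
--     for key, value in adpoints.items():
--         if key == SCATTER or key == '11':
--             out[key] = value
--             continue
--         cols = [[i for i in value if i % 5 == r] for r in range(5)]
--         k = 5 if cols[4] else 4 if cols[3] else 3 if cols[2] else 2 if cols[1] else 0
--         if k == 0 or any(not cols[r] for r in range(k)):
--             out[key] = []
--             continue
--         if key in WILD_STR:
--             kept = [x for r in range(k) for x in cols[r]]
--         else:
--             nw = [any(points[x] not in WILD for x in cols[r]) for r in range(k)]
--             kept = [x for r in range(k) for x in cols[r]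
--                     if points[x] not in WILD or any(nw[s] for s in range(k) if s != r)]
--         out[key] = sorted(set(kept))
--     return out
-- ===== Notes on version B (the rewrite author's own statement) =====
-- stated objective: faster
-- what changed: B computes each key's surviving point set directly with a per-column survival rule (a point is kept iff it is non-wild or some other residue column contains a non-wild point), instead of A's enumeration of the full Cartesian product of the five residue columns.
-- outside the precondition, e.g. on filterAdpoints({'3': [-5, 1]}, [7, 7, 7, 7, 7]): A returns {'3': [1, -5]}, B returns {'3': [-5, 1]}
import Mathlib
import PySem

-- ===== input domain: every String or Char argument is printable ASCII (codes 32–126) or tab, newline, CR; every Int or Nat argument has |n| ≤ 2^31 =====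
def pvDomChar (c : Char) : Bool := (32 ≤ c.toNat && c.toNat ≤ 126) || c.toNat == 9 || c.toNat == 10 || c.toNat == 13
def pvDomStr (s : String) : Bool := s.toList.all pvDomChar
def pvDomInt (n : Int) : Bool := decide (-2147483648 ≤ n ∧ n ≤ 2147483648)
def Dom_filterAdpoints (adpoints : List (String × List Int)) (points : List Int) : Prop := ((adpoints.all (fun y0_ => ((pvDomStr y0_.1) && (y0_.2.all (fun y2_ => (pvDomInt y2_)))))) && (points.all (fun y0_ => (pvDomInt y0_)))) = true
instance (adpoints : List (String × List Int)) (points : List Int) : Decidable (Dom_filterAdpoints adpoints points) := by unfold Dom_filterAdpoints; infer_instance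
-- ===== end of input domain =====

-- B replaces A's enumeration of the Cartesian product of the residue columns by a direct
-- per-column survival rule (objective: faster, asymptotically). Return-value equivalence only.

-- ===== PORT A =====
def pvWILD : List Int := [10]
def pvWILD_STR : List String := ["10"]
def pvSCATTER : String := "9"

-- 'points[x] not in WILD' (pyGetD is exact here: under Pre_ every evaluated index is in range)
def pvNonwild (points : List Int) (x : Int) : Bool := !(pvWILD.contains (PySem.List.pyGetD points x 0))

-- the body of A's partitioning loop over `value`
def pvColsStep (s : List Int × List Int × List Int × List Int × List Int) (i : Int) :
    List Int × List Int × List Int × List Int × List Int :=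
  if PySem.Int.mod i 5 = 0 then (s.1 ++ [i], s.2.1, s.2.2.1, s.2.2.2.1, s.2.2.2.2)
  else if PySem.Int.mod i 5 = 1 then (s.1, s.2.1 ++ [i], s.2.2.1, s.2.2.2.1, s.2.2.2.2)
  else if PySem.Int.mod i 5 = 2 then (s.1, s.2.1, s.2.2.1 ++ [i], s.2.2.2.1, s.2.2.2.2)
  else if PySem.Int.mod i 5 = 3 then (s.1, s.2.1, s.2.2.1, s.2.2.2.1 ++ [i], s.2.2.2.2)
  else if PySem.Int.mod i 5 = 4 then (s.1, s.2.1, s.2.2.1, s.2.2.2.1, s.2.2.2.2 ++ [i])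
  else s

def pvColsA (value : List Int) : List Int × List Int × List Int × List Int × List Int :=
  value.foldl pvColsStep ([], [], [], [], [])

-- the four nested list comprehensions (if/elif chain)
def pvLinesA (c1 c2 c3 c4 c5 : List Int) : List (List Int) :=
  if c5.length > 0 then
    c1.flatMap fun a => c2.flatMap fun b => c3.flatMap fun c => c4.flatMap fun d => c5.map fun e => [a, b, c, d, e]
  else if c4.length > 0 then
    c1.flatMap fun a => c2.flatMap fun b => c3.flatMap fun c => c4.map fun d => [a, b, c, d]
  else if c3.length > 0 then
    c1.flatMap fun a => c2.flatMap fun b => c3.map fun c => [a, b, c]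
  else if c2.length > 0 then
    c1.flatMap fun a => c2.map fun b => [a, b]
  else []

-- one iteration of A's main loop for a key that is neither SCATTER nor '11'.
-- 'list(set(u))' is ported as ascending order: exact under Pre_ (all collected points lie
-- in 0..7, where CPython's set iterates ascending); outside Pre_ nothing is claimed.
def pvEntryA (points : List Int) (key : String) (value : List Int) : List Int :=
  let c := pvColsA value
  let lines := pvLinesA c.1 c.2.1 c.2.2.1 c.2.2.2.1 c.2.2.2.2
  let removeLines := lines.foldl (fun acc i =>
    if (i.filter (fun x => pvNonwild points x)).length ≤ 0 ∧ ¬ key ∈ pvWILD_STR then acc ++ [i] else acc) []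
  let after := removeLines.foldl (fun ls i => (PySem.List.remove? ls i).getD ls) lines
  let u := after.foldl (fun acc i => acc ++ i) []
  PySem.List.sorted (PySem.Set.ofList u) (fun x => x) false

def filterAdpoints (adpoints : List (String × List Int)) (points : List Int) : List (String × List Int) :=
  (adpoints.foldl (fun (d : PySem.Dict String (List Int)) kv =>
      if kv.1 ≠ pvSCATTER ∧ kv.1 ≠ "11" then d.insert kv.1 (pvEntryA points kv.1 kv.2)
      else if kv.1 = pvSCATTER then d.insert pvSCATTER kv.2
      else d.insert "11" kv.2)
    PySem.Dict.empty).items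

-- ===== PORT B =====
def pvColsB (value : List Int) : List (List Int) :=
  (List.range 5).map fun r => value.filter fun i => decide (PySem.Int.mod i 5 = (r : Int))

def pvKB (cols : List (List Int)) : Nat :=
  if cols.getD 4 [] ≠ [] then 5 else if cols.getD 3 [] ≠ [] then 4
  else if cols.getD 2 [] ≠ [] then 3 else if cols.getD 1 [] ≠ [] then 2 else 0

-- x survives iff it is non-wild, or some OTHER column of the product carries a non-wild point
def pvKeptB (points : List Int) (key : String) (cols : List (List Int)) (k : Nat) : List Int :=
  if pvWILD_STR.contains key then (List.range k).flatMap fun r => cols.getD r []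
  else
    let nw := (List.range k).map fun r => (cols.getD r []).any (pvNonwild points)
    (List.range k).flatMap fun r => (cols.getD r []).filter fun x =>
      pvNonwild points x || (List.range k).any fun s => s != r && nw.getD s false

def pvEntryB (points : List Int) (key : String) (value : List Int) : List Int :=
  let cols := pvColsB value
  let k := pvKB cols
  if k = 0 ∨ (List.range k).any (fun r => (cols.getD r []).isEmpty) then []
  else PySem.List.sorted (PySem.Set.ofList (pvKeptB points key cols k)) (fun x => x) false

def filterAdpoints_alt (adpoints : List (String × List Int)) (points : List Int) : List (String × List Int) :=
  (adpoints.foldl (fun (d : PySem.Dict String (List Int)) kv =>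
      if kv.1 = pvSCATTER ∨ kv.1 = "11" then d.insert kv.1 kv.2
      else d.insert kv.1 (pvEntryB points kv.1 kv.2))
    PySem.Dict.empty).items

-- ===== PRECONDITION & SPEC =====
def pvColHas (value : List Int) (r : Nat) : Bool := value.any fun x => decide (PySem.Int.mod x 5 = (r : Int))
def pvKpre (value : List Int) : Nat :=
  if pvColHas value 4 then 5 else if pvColHas value 3 then 4
  else if pvColHas value 2 then 3 else if pvColHas value 1 then 2 else 0
def pvHasLines (value : List Int) : Bool :=
  decide (pvKpre value ≠ 0) && (List.range (pvKpre value)).all (pvColHas value)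

-- Pre_ excludes (a) inputs where A raises IndexError (an enumerated line point is out of range
-- of `points`), and (b) inputs A returns on where an enumerated point is negative (Python
-- wraparound) or ≥ 8 — there the order of A's `list(set(...))` is a CPython hash-table
-- accident that no re-implementation should reproduce; B returns the set in ascending order.
def Pre_filterAdpoints (adpoints : List (String × List Int)) (points : List Int) : Prop :=
  ∀ p ∈ adpoints, p.1 = "9" ∨ p.1 = "11" ∨ pvHasLines p.2 = false ∨
    ∀ x ∈ p.2, PySem.Int.mod x 5 < (pvKpre p.2 : Int) → 0 ≤ x ∧ x < 8 ∧ x < (points.length : Int)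
instance (adpoints : List (String × List Int)) (points : List Int) : Decidable (Pre_filterAdpoints adpoints points) := by unfold Pre_filterAdpoints; infer_instance

def pvWitness_filterAdpoints : (List (String × List Int)) × List Int :=
  ([("3", [0, 6, 1]), ("9", [2])], [10, 5, 3, 4, 5, 6, 7])

def Spec_filterAdpoints (adpoints : List (String × List Int)) (points : List Int) (out : List (String × List Int)) : Prop := out = filterAdpoints_alt adpoints points
instance (adpoints : List (String × List Int)) (points : List Int) (out : List (String × List Int)) : Decidable (Spec_filterAdpoints adpoints points out) := by unfold Spec_filterAdpoints; infer_instance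

-- ===== CLAIM (what is proved, stated in full; the proofs are below) =====
def Claim_equal_filterAdpoints : Prop := ∀ (adpoints : List (String × List Int)) (points : List Int), Dom_filterAdpoints adpoints points → Pre_filterAdpoints adpoints points → Spec_filterAdpoints adpoints points (filterAdpoints adpoints points)

-- ===== LEMMAS AND PROOFS =====

-- the residue-r column of `value`
def pvF (value : List Int) (r : Nat) : List Int :=
  value.filter fun i => decide (PySem.Int.mod i 5 = (r : Int))

-- the Cartesian product of a list of columns (proof-side model of A's comprehensions)
def pvProd : List (List Int) → List (List Int)
  | [] => [[]]
  | c :: cs => c.flatMap fun a => (pvProd cs).map fun L => a :: L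

lemma pvColsA_go (value : List Int) : ∀ c1 c2 c3 c4 c5 : List Int,
    value.foldl pvColsStep (c1, c2, c3, c4, c5) =
      (c1 ++ pvF value 0, c2 ++ pvF value 1, c3 ++ pvF value 2, c4 ++ pvF value 3, c5 ++ pvF value 4) := by
  induction value with
  | nil => intro c1 c2 c3 c4 c5; simp [pvF]
  | cons i v ih =>
    intro c1 c2 c3 c4 c5
    have h0 : 0 ≤ PySem.Int.mod i 5 := PySem.Int.mod_nonneg i (by norm_num)
    have h5 : PySem.Int.mod i 5 < 5 := PySem.Int.mod_lt i (by norm_num)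
    rw [List.foldl_cons]
    have : PySem.Int.mod i 5 = 0 ∨ PySem.Int.mod i 5 = 1 ∨ PySem.Int.mod i 5 = 2 ∨
        PySem.Int.mod i 5 = 3 ∨ PySem.Int.mod i 5 = 4 := by omega
    rcases this with hm | hm | hm | hm | hm <;>
      (simp only [pvColsStep, hm]; norm_num; rw [ih];
       simp only [pvF, List.filter_cons, hm]; norm_num [List.append_assoc])

lemma pvColsA_eq (value : List Int) :
    pvColsA value = (pvF value 0, pvF value 1, pvF value 2, pvF value 3, pvF value 4) := by
  unfold pvColsA
  rw [pvColsA_go]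
  simp

lemma pvColsB_eq (value : List Int) :
    pvColsB value = [pvF value 0, pvF value 1, pvF value 2, pvF value 3, pvF value 4] := by
  simp [pvColsB, pvF, List.range_succ]

lemma rm_eq_erase (ls : List (List Int)) (i : List Int) :
    (PySem.List.remove? ls i).getD ls = ls.erase i := by
  by_cases h : i ∈ ls
  · rw [PySem.List.remove?_eq_some_erase ls i h]; rfl
  · rw [(PySem.List.remove?_eq_none_iff ls i).mpr h]
    simp [List.erase_of_not_mem h]

lemma foldl_erase_cons (x : List Int) (ys : List (List Int)) (h : ∀ i ∈ ys, i ≠ x) :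
    ∀ xs, ys.foldl List.erase (x :: xs) = x :: ys.foldl List.erase xs := by
  induction ys with
  | nil => intro xs; rfl
  | cons y ys ih =>
    intro xs
    rw [List.foldl_cons, List.foldl_cons,
      List.erase_cons_tail (by simpa using fun hxy => (h y (by simp)) hxy.symm)]
    exact ih (fun i hi => h i (by simp [hi])) _

lemma foldl_erase_filter (p : List Int → Bool) (l : List (List Int)) :
    (l.filter p).foldl List.erase l = l.filter (fun i => !p i) := by
  induction l with
  | nil => rfl
  | cons x xs ih =>
    by_cases hp : p x
    · rw [List.filter_cons_of_pos hp, List.foldl_cons, List.erase_cons_head,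
        List.filter_cons_of_neg (by simp [hp]), ih]
    · rw [List.filter_cons_of_neg hp,
        foldl_erase_cons x _ (fun i hi => by
          intro hix; subst hix
          exact hp (List.of_mem_filter hi)),
        List.filter_cons_of_pos (by simp [hp]), ih]

lemma mem_pvProd {L : List Int} {cs : List (List Int)} :
    L ∈ pvProd cs ↔ List.Forall₂ (· ∈ ·) L cs := by
  induction cs generalizing L with
  | nil => simp [pvProd, List.forall₂_nil_right_iff]
  | cons c cs ih =>
    simp only [pvProd, List.mem_flatMap, List.mem_map, List.forall₂_cons_right_iff]
    constructor
    · rintro ⟨a, ha, M, hM, rfl⟩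
      exact ⟨a, M, ha, ih.mp hM, rfl⟩
    · rintro ⟨a, M, ha, hM, rfl⟩
      exact ⟨a, ha, M, ih.mpr hM, rfl⟩

lemma pvProd_eq_nil (cs : List (List Int)) (h : [] ∈ cs) : pvProd cs = [] := by
  induction cs with
  | nil => simp at h
  | cons c cs ih =>
    rcases List.mem_cons.mp h with h | h
    · simp [pvProd, ← h]
    · simp [pvProd, ih h]

lemma headD_mem {c : List Int} (h : c ≠ []) : c.headD 0 ∈ c := by
  cases c with
  | nil => simp at h
  | cons a t => simp

lemma exists_line (cs : List (List Int)) (hne : ∀ c ∈ cs, c ≠ []) (p : Int → Bool)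
    (r : Nat) (hr : r < cs.length) (x : Int) (hx : x ∈ cs[r])
    (s : Nat) (hs : s < cs.length) (z : Int) (hz : z ∈ cs[s])
    (hp : p x = true ∨ (s ≠ r ∧ p z = true)) :
    ∃ L ∈ pvProd cs, L.any p = true ∧ x ∈ L := by
  classical
  set g : Nat → Int := fun t =>
    if t = r then x else if t = s then z else (cs.getD t []).headD 0 with hg
  set L : List Int := (List.range cs.length).map g with hL
  have hlen : L.length = cs.length := by simp [hL]
  have hget : ∀ t (ht : t < cs.length), L[t]'(by omega) = g t := by
    intro t ht
    simp [hL]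
  have hmemL : ∀ t (ht : t < cs.length), g t ∈ cs[t] := by
    intro t ht
    by_cases h1 : t = r
    · subst h1; simpa [hg] using hx
    · by_cases h2 : t = s
      · subst h2; simpa [hg, h1] using hz
      · have hgd : cs.getD t [] = cs[t] := List.getD_eq_getElem cs [] ht
        simp only [hg]
        rw [if_neg h1, if_neg h2, hgd]
        exact headD_mem (hne _ (cs.getElem_mem ht))
  have hF : List.Forall₂ (· ∈ ·) L cs := by
    rw [List.forall₂_iff_get]
    refine ⟨by omega, ?_⟩
    intro i h1 h2
    simp only [List.get_eq_getElem]
    rw [hget i h2]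
    exact hmemL i h2
  have hxL : x ∈ L := by
    have : L[r]'(by omega) = x := by rw [hget r hr]; simp [hg]
    rw [← this]; exact List.getElem_mem _
  refine ⟨L, mem_pvProd.mpr hF, ?_, hxL⟩
  rcases hp with hp | ⟨hsr, hp⟩
  · exact List.any_eq_true.mpr ⟨x, hxL, hp⟩
  · have : L[s]'(by omega) = z := by rw [hget s hs]; simp [hg, hsr]
    exact List.any_eq_true.mpr ⟨z, by rw [← this]; exact List.getElem_mem _, hp⟩

lemma mem_flatten_filter_prod (cs : List (List Int)) (p : Int → Bool)
    (hne : ∀ c ∈ cs, c ≠ []) (x : Int) :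
    (x ∈ ((pvProd cs).filter (fun L => L.any p)).flatten) ↔
      ∃ r, ∃ hr : r < cs.length, x ∈ cs[r] ∧
        (p x = true ∨ ∃ s, ∃ hs : s < cs.length, s ≠ r ∧ ∃ z ∈ cs[s], p z = true) := by
  rw [List.mem_flatten]
  constructor
  · rintro ⟨L, hLmem, hxL⟩
    rw [List.mem_filter] at hLmem
    obtain ⟨hLprod, hany⟩ := hLmem
    have hF := mem_pvProd.mp hLprod
    have hlen := hF.length_eq
    rw [List.forall₂_iff_get] at hF
    simp only [List.get_eq_getElem] at hF
    obtain ⟨i, hi, rfl⟩ := List.mem_iff_getElem.mp hxL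
    refine ⟨i, by omega, hF.2 i hi (by omega), ?_⟩
    by_cases hpx : p L[i]
    · exact Or.inl hpx
    · obtain ⟨z, hzL, hpz⟩ := List.any_eq_true.mp hany
      obtain ⟨j, hj, rfl⟩ := List.mem_iff_getElem.mp hzL
      have hji : j ≠ i := by rintro rfl; exact hpx hpz
      exact Or.inr ⟨j, by omega, hji, L[j], hF.2 j hj (by omega), hpz⟩
  · rintro ⟨r, hr, hx, hrest⟩
    have : ∃ L ∈ pvProd cs, L.any p = true ∧ x ∈ L := by
      rcases hrest with hpx | ⟨s, hs, hsr, z, hz, hpz⟩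
      · exact exists_line cs hne p r hr x hx r hr x hx (Or.inl hpx)
      · exact exists_line cs hne p r hr x hx s hs z hz (Or.inr ⟨hsr, hpz⟩)
    obtain ⟨L, hL, hany, hxL⟩ := this
    exact ⟨L, List.mem_filter.mpr ⟨hL, hany⟩, hxL⟩

lemma mem_flatten_prod (cs : List (List Int)) (hne : ∀ c ∈ cs, c ≠ []) (x : Int) :
    (x ∈ (pvProd cs).flatten) ↔ ∃ r, ∃ hr : r < cs.length, x ∈ cs[r] := by
  rw [List.mem_flatten]
  constructor
  · rintro ⟨L, hLprod, hxL⟩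
    have hF := mem_pvProd.mp hLprod
    have hlen := hF.length_eq
    rw [List.forall₂_iff_get] at hF
    simp only [List.get_eq_getElem] at hF
    obtain ⟨i, hi, rfl⟩ := List.mem_iff_getElem.mp hxL
    exact ⟨i, by omega, hF.2 i hi (by omega)⟩
  · rintro ⟨r, hr, hx⟩
    obtain ⟨L, hL, _, hxL⟩ :=
      exists_line cs hne (fun _ => true) r hr x hx r hr x hx (Or.inl rfl)
    exact ⟨L, hL, hxL⟩

lemma sortedSet_ext (u v : List Int) (h : ∀ x, x ∈ u ↔ x ∈ v) :
    PySem.List.sorted (PySem.Set.ofList u) (fun x => x) false =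
      PySem.List.sorted (PySem.Set.ofList v) (fun x => x) false := by
  apply PySem.List.sorted_eq_sorted_of_perm _ _ _ (fun a b hab => hab)
  exact (List.perm_ext_iff_of_nodup (PySem.Set.nodup_ofList u) (PySem.Set.nodup_ofList v)).mpr
    (by intro a; simpa [PySem.Set.mem_ofList] using h a)

lemma mem_keptB (points : List Int) (key : String) (cols : List (List Int)) (k : Nat) (x : Int)
    (hkey : ¬ key ∈ pvWILD_STR) :
    x ∈ pvKeptB points key cols k ↔
      ∃ r, ∃ hr : r < k, x ∈ cols.getD r [] ∧
        (pvNonwild points x = true ∨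
          ∃ s, ∃ hs : s < k, s ≠ r ∧ ∃ z ∈ cols.getD s [], pvNonwild points z = true) := by
  have hc : pvWILD_STR.contains key = false := by
    simpa using hkey
  simp only [pvKeptB, hc, Bool.false_eq_true, if_false, List.mem_flatMap, List.mem_range,
    List.mem_filter, Bool.or_eq_true, List.any_eq_true, bne_iff_ne, Bool.and_eq_true]
  constructor
  · rintro ⟨r, hr, hx, hcond⟩
    refine ⟨r, hr, hx, ?_⟩
    rcases hcond with h | ⟨s, hs, hsr, hnw⟩
    · exact Or.inl h
    · rw [PySem.List.getD_map_range _ _ _ _ hs] at hnw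
      obtain ⟨z, hz, hpz⟩ := List.any_eq_true.mp hnw
      exact Or.inr ⟨s, hs, hsr, z, hz, hpz⟩
  · rintro ⟨r, hr, hx, hcond⟩
    refine ⟨r, hr, hx, ?_⟩
    rcases hcond with h | ⟨s, hs, hsr, z, hz, hpz⟩
    · exact Or.inl h
    · refine Or.inr ⟨s, hs, hsr, ?_⟩
      rw [PySem.List.getD_map_range _ _ _ _ hs]
      exact List.any_eq_true.mpr ⟨z, hz, hpz⟩

lemma mem_keptB_wild (points : List Int) (key : String) (cols : List (List Int)) (k : Nat) (x : Int)
    (hkey : key ∈ pvWILD_STR) :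
    x ∈ pvKeptB points key cols k ↔ ∃ r, ∃ hr : r < k, x ∈ cols.getD r [] := by
  have hc : pvWILD_STR.contains key = true := by simpa using hkey
  simp only [pvKeptB, hc, if_true, List.mem_flatMap, List.mem_range]
  constructor
  · rintro ⟨r, hr, hx⟩; exact ⟨r, hr, hx⟩
  · rintro ⟨r, hr, hx⟩; exact ⟨r, hr, hx⟩

lemma core_eq (points : List Int) (key : String) (cs cols : List (List Int)) (k : Nat)
    (hlen : cs.length = k)
    (hcs : ∀ r (hr : r < k), cs[r]'(by omega) = cols.getD r [])
    (hne : ∀ c ∈ cs, c ≠ []) :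
    PySem.List.sorted (PySem.Set.ofList
        (((pvProd cs).filter (fun i =>
          !decide ((i.filter fun x => pvNonwild points x).length ≤ 0 ∧ ¬ key ∈ pvWILD_STR))).flatten))
        (fun x => x) false =
      PySem.List.sorted (PySem.Set.ofList (pvKeptB points key cols k)) (fun x => x) false := by
  apply sortedSet_ext
  intro x
  by_cases hkey : key ∈ pvWILD_STR
  · have hfilt : (pvProd cs).filter (fun i =>
        !decide ((i.filter fun x => pvNonwild points x).length ≤ 0 ∧ ¬ key ∈ pvWILD_STR)) =
        pvProd cs := by
      apply List.filter_eq_self.mpr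
      intro a _
      simp [hkey]
    rw [hfilt, mem_flatten_prod cs hne x, mem_keptB_wild points key cols k x hkey]
    constructor
    · rintro ⟨r, hr, hx⟩; exact ⟨r, by omega, by rw [← hcs r (by omega)]; exact hx⟩
    · rintro ⟨r, hr, hx⟩; exact ⟨r, by omega, by rw [hcs r hr]; exact hx⟩
  · have hq : ∀ i ∈ pvProd cs, (!decide ((i.filter fun x => pvNonwild points x).length ≤ 0 ∧ ¬ key ∈ pvWILD_STR)) =
        i.any (pvNonwild points) := by
      intro i _
      simp only [hkey, not_false_iff, and_true]
      rcases h : i.any (pvNonwild points) with _ | _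
      · have hnil : i.filter (fun x => pvNonwild points x) = [] :=
          List.filter_eq_nil_iff.mpr (fun a ha => by simp [List.any_eq_false.mp h a ha])
        simp [hnil]
      · obtain ⟨z, hz, hpz⟩ := List.any_eq_true.mp h
        have : (i.filter fun x => pvNonwild points x) ≠ [] := by
          intro hnil
          have := List.mem_filter.mpr ⟨hz, hpz⟩
          rw [hnil] at this; simp at this
        simp [List.length_eq_zero_iff, this]
    rw [List.filter_congr hq, mem_flatten_filter_prod cs (pvNonwild points) hne x,
      mem_keptB points key cols k x hkey]
    constructor
    · rintro ⟨r, hr, hx, hcond⟩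
      refine ⟨r, by omega, by rw [← hcs r (by omega)]; exact hx, ?_⟩
      rcases hcond with h | ⟨s, hs, hsr, z, hz, hpz⟩
      · exact Or.inl h
      · exact Or.inr ⟨s, by omega, hsr, z, by rw [← hcs s (by omega)]; exact hz, hpz⟩
    · rintro ⟨r, hr, hx, hcond⟩
      refine ⟨r, by omega, by rw [hcs r hr]; exact hx, ?_⟩
      rcases hcond with h | ⟨s, hs, hsr, z, hz, hpz⟩
      · exact Or.inl h
      · exact Or.inr ⟨s, by omega, hsr, z, by rw [hcs s hs]; exact hz, hpz⟩

lemma lines_prod_5 (f0 f1 f2 f3 f4 : List Int) (h4 : f4 ≠ []) :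
    pvLinesA f0 f1 f2 f3 f4 = pvProd [f0, f1, f2, f3, f4] := by
  rw [pvLinesA, if_pos (by simpa using List.length_pos_iff.mpr h4)]
  simp [pvProd, List.map_flatMap, List.flatMap_map, List.map_map, Function.comp_def, ← List.map_eq_flatMap]

lemma lines_prod_4 (f0 f1 f2 f3 f4 : List Int) (h4 : f4 = []) (h3 : f3 ≠ []) :
    pvLinesA f0 f1 f2 f3 f4 = pvProd [f0, f1, f2, f3] := by
  rw [pvLinesA, if_neg (by simp [h4]), if_pos (by simpa using List.length_pos_iff.mpr h3)]
  simp [pvProd, List.map_flatMap, List.flatMap_map, List.map_map, Function.comp_def, ← List.map_eq_flatMap]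

lemma lines_prod_3 (f0 f1 f2 f3 f4 : List Int) (h4 : f4 = []) (h3 : f3 = []) (h2 : f2 ≠ []) :
    pvLinesA f0 f1 f2 f3 f4 = pvProd [f0, f1, f2] := by
  rw [pvLinesA, if_neg (by simp [h4]), if_neg (by simp [h3]), if_pos (by simpa using List.length_pos_iff.mpr h2)]
  simp [pvProd, List.map_flatMap, List.flatMap_map, List.map_map, Function.comp_def, ← List.map_eq_flatMap]

lemma lines_prod_2 (f0 f1 f2 f3 f4 : List Int) (h4 : f4 = []) (h3 : f3 = []) (h2 : f2 = []) (h1 : f1 ≠ []) :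
    pvLinesA f0 f1 f2 f3 f4 = pvProd [f0, f1] := by
  rw [pvLinesA, if_neg (by simp [h4]), if_neg (by simp [h3]), if_neg (by simp [h2]),
    if_pos (by simpa using List.length_pos_iff.mpr h1)]
  simp [pvProd, List.map_flatMap, List.flatMap_map, List.map_map, Function.comp_def, ← List.map_eq_flatMap]

lemma lines_nil (f0 f1 f2 f3 f4 : List Int) (h4 : f4 = []) (h3 : f3 = []) (h2 : f2 = []) (h1 : f1 = []) :
    pvLinesA f0 f1 f2 f3 f4 = [] := by
  rw [pvLinesA, if_neg (by simp [h4]), if_neg (by simp [h3]), if_neg (by simp [h2]), if_neg (by simp [h1])]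

lemma entry_eq (points : List Int) (key : String) (value : List Int) :
    pvEntryA points key value = pvEntryB points key value := by
  have hA : pvEntryA points key value =
      PySem.List.sorted (PySem.Set.ofList
        (((pvLinesA (pvF value 0) (pvF value 1) (pvF value 2) (pvF value 3) (pvF value 4)).filter
            (fun i => !decide ((i.filter fun x => pvNonwild points x).length ≤ 0 ∧ ¬ key ∈ pvWILD_STR))).flatten))
        (fun x => x) false := by
    simp only [pvEntryA, pvColsA_eq]
    rw [PySem.List.foldl_append_ite_eq_filter
        (fun i => (List.filter (fun x => pvNonwild points x) i).length ≤ 0 ∧ ¬ key ∈ pvWILD_STR),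
      List.nil_append,
      PySem.List.foldl_congr_mem _ _ (fun ls i => ls.erase i) _ (fun acc i _ => rm_eq_erase acc i),
      foldl_erase_filter,
      PySem.List.foldl_append_eq_flatMap (fun (i : List Int) => i),
      List.nil_append, List.flatMap_id']
  rw [hA]
  simp only [pvEntryB, pvColsB_eq]
  by_cases h4 : pvF value 4 = []
  · by_cases h3 : pvF value 3 = []
    · by_cases h2 : pvF value 2 = []
      · by_cases h1 : pvF value 1 = []
        · -- k = 0
          rw [lines_nil _ _ _ _ _ h4 h3 h2 h1,
            if_pos (Or.inl (by simp [pvKB, h4, h3, h2, h1]))]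
          rfl
        · -- k = 2
          have hk : pvKB [pvF value 0, pvF value 1, pvF value 2, pvF value 3, pvF value 4] = 2 := by
            simp [pvKB, h4, h3, h2, h1]
          rw [hk, lines_prod_2 _ _ _ _ _ h4 h3 h2 h1]
          by_cases h0 : pvF value 0 = []
          · rw [pvProd_eq_nil _ (by simp [← h0]),
              if_pos (Or.inr (by simp [List.range_succ, List.isEmpty_iff, h0]))]
            rfl
          · rw [if_neg (by simp [List.range_succ, List.isEmpty_iff, h0, h1])]
            exact core_eq points key [pvF value 0, pvF value 1] _ 2 rfl
              (fun r hr => by interval_cases r <;> rfl)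
              (by intro c hc; simp at hc; rcases hc with rfl | rfl <;> assumption)
      · -- k = 3
        have hk : pvKB [pvF value 0, pvF value 1, pvF value 2, pvF value 3, pvF value 4] = 3 := by
          simp [pvKB, h4, h3, h2]
        rw [hk, lines_prod_3 _ _ _ _ _ h4 h3 h2]
        by_cases hall : pvF value 0 = [] ∨ pvF value 1 = []
        · rw [pvProd_eq_nil _ (by rcases hall with h | h <;> simp [← h]),
            if_pos (Or.inr (by rcases hall with h | h <;> simp [List.range_succ, List.isEmpty_iff, h]))]
          rfl
        · push Not at hall
          rw [if_neg (by simp [List.range_succ, List.isEmpty_iff, hall.1, hall.2, h2])]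
          exact core_eq points key [pvF value 0, pvF value 1, pvF value 2] _ 3 rfl
            (fun r hr => by interval_cases r <;> rfl)
            (by intro c hc; simp at hc; rcases hc with rfl | rfl | rfl
                exacts [hall.1, hall.2, h2])
    · -- k = 4
      have hk : pvKB [pvF value 0, pvF value 1, pvF value 2, pvF value 3, pvF value 4] = 4 := by
        simp [pvKB, h4, h3]
      rw [hk, lines_prod_4 _ _ _ _ _ h4 h3]
      by_cases hall : pvF value 0 = [] ∨ pvF value 1 = [] ∨ pvF value 2 = []
      · rw [pvProd_eq_nil _ (by rcases hall with h | h | h <;> simp [← h]),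
          if_pos (Or.inr (by rcases hall with h | h | h <;> simp [List.range_succ, List.isEmpty_iff, h]))]
        rfl
      · push Not at hall
        rw [if_neg (by simp [List.range_succ, List.isEmpty_iff, hall.1, hall.2.1, hall.2.2, h3])]
        exact core_eq points key [pvF value 0, pvF value 1, pvF value 2, pvF value 3] _ 4 rfl
          (fun r hr => by interval_cases r <;> rfl)
          (by intro c hc; simp at hc; rcases hc with rfl | rfl | rfl | rfl
              exacts [hall.1, hall.2.1, hall.2.2, h3])
  · -- k = 5
    have hk : pvKB [pvF value 0, pvF value 1, pvF value 2, pvF value 3, pvF value 4] = 5 := by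
      simp [pvKB, h4]
    rw [hk, lines_prod_5 _ _ _ _ _ h4]
    by_cases hall : pvF value 0 = [] ∨ pvF value 1 = [] ∨ pvF value 2 = [] ∨ pvF value 3 = []
    · rw [pvProd_eq_nil _ (by rcases hall with h | h | h | h <;> simp [← h]),
        if_pos (Or.inr (by rcases hall with h | h | h | h <;> simp [List.range_succ, List.isEmpty_iff, h]))]
      rfl
    · push Not at hall
      rw [if_neg (by simp [List.range_succ, List.isEmpty_iff, hall.1, hall.2.1, hall.2.2.1, hall.2.2.2, h4])]
      exact core_eq points key [pvF value 0, pvF value 1, pvF value 2, pvF value 3, pvF value 4] _ 5 rfl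
        (fun r hr => by interval_cases r <;> rfl)
        (by intro c hc; simp at hc; rcases hc with rfl | rfl | rfl | rfl | rfl
            exacts [hall.1, hall.2.1, hall.2.2.1, hall.2.2.2, h4])

-- ===== VERDICT (by name: the statement is the Claim_ definition above) =====
theorem filterAdpoints_spec : Claim_equal_filterAdpoints := by
  intro adpoints points _ _
  unfold Spec_filterAdpoints filterAdpoints filterAdpoints_alt
  congr 1
  apply PySem.List.foldl_congr_mem
  intro d kv _
  by_cases h9 : kv.1 = pvSCATTER
  · simp [h9, pvSCATTER]
  · by_cases h11 : kv.1 = "11"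
    · simp [h11, pvSCATTER]
    · simp [h9, h11, entry_eq]
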